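-- pv_equiv track=rewrite | github.com/evinode/MyRepos | pyprogs.py | acmTeam
-- ===== SOURCE A (Python) =====
-- def acmTeam(topic):
--     # Write your code here
--     n=len(topic)
--     m=len(topic[0])
--     i=0
--     j=0
--     teams=[]
--     while i<n-1:
--         j=i+1
--         while j<n:
--             tstr=""
--             ones=0
--             for k in range(m):
--                 if topic[i][k]=="0" and topic[j][k]=="0":
--                     tstr=tstr+"0"
--                 else:
--                     tstr=tstr+"1"
--                     ones+=1
--             teams.append(ones)
--             j=j+1
--         i=i+1
--     steams=sorted(teams,reverse=True)
--     k=steams[0]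
--     cou=0
--     for i in steams:
--         if i==k:
--             cou+=1
--         else:
--             break
--     return [k,cou]
-- ===== SOURCE B (Python) =====
-- def acmTeam(topic):
--     # Pack each row into one integer bitmask, then OR + popcount per pair,
--     # tracking the running maximum and its count in one pass.
--     m = len(topic[0])
--     masks = []
--     for s in topic:
--         mask = 0
--         for k in range(m):
--             if s[k] != "0":
--                 mask += 1 << k
--         masks.append(mask)
--     best = -1
--     cnt = 0
--     for i in range(len(masks)):
--         for j in range(i + 1, len(masks)):
--             c = (masks[i] | masks[j]).bit_count()
--             if best < c:
--                 best, cnt = c, 1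
--             elif c == best:
--                 cnt += 1
--     return [best, cnt]
-- ===== Notes on version B (the rewrite author's own statement) =====
-- stated objective: faster
-- what changed: B packs each row into one integer bitmask once, computes each pair's score as popcount(mask_i | mask_j), and tracks the running maximum and its count in a single pass, instead of A's per-pair character-by-character string building followed by sort-then-scan.
-- outside the precondition, e.g. on acmTeam([' ', '']): A returns [1, 1], B raises IndexError
-- crash fix: On a single-row input A raises IndexError at steams[0] while B's pair loop is empty and it returns [-1, 0]. — e.g. on acmTeam(["101"]): A raises IndexError, B returns [-1, 0]
import Mathlib
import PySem

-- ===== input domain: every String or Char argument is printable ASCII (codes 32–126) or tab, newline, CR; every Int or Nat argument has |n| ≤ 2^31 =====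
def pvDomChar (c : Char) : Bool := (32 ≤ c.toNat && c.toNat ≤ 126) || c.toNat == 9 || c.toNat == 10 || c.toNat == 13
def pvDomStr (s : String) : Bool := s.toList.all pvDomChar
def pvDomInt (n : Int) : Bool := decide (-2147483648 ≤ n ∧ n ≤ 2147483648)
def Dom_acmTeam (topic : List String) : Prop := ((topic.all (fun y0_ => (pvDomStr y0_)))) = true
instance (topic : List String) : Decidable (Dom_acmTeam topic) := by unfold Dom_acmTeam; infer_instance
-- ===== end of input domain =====

-- B replaces A's per-pair character loop by per-row integer bitmasks combined with OR + popcount,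
-- and a single running max/count pass instead of sort-then-scan (objective: faster, constant-factor word packing).

-- ===== PORT A =====
-- inner 'for k in range(m)' of A: builds tstr and ones exactly as the Python does
def acmInnerA (u v : List Char) (m : Nat) : String × Int :=
  (List.range m).foldl (fun st k =>
    if u.getD k ' ' = '0' ∧ v.getD k ' ' = '0' then (st.1.push '0', st.2)
    else (st.1.push '1', st.2 + 1)) ("", 0)

-- 'for i in steams: if i==k: cou+=1 else: break'
def acmCou : List Int → Int → Int
  | [], _ => 0
  | x :: xs, k => if x = k then 1 + acmCou xs k else 0

-- A; strings handled as their char lists; topic[0]/topic[i][k]/steams[0] accesses use defaults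
-- exactly where the Python raises (those inputs are excluded by Pre_acmTeam);
-- the while loops over counters are folds over the ranges they enumerate (nonnegative bounds)
def acmTeam (topic : List String) : List Int :=
  let tl := topic.map String.toList
  let n := tl.length
  let m := (tl.getD 0 []).length
  let teams : List Int := (List.range (n - 1)).foldl (fun acc i =>
      (List.range' (i + 1) (n - (i + 1))).foldl (fun acc2 j =>
        acc2 ++ [(acmInnerA (tl.getD i []) (tl.getD j []) m).2]) acc) []
  let steams := PySem.List.sorted teams (fun x => x) true
  let k := steams.getD 0 0
  [k, acmCou steams k]

-- ===== PORT B =====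
-- 'mask = 0; for k in range(m): if s[k] != "0": mask += 1 << k'; s[k] via getD, exact on
-- every input where the Python indexing succeeds (k < len(s))
def pvMask (s : List Char) (m : Nat) : Int :=
  (List.range m).foldl (fun acc k => if s.getD k ' ' ≠ '0' then acc + 1 <<< k else acc) 0

-- B; (x | y).bit_count() is PySem.Int.bor / PySem.Int.bitCount; ranges over nonnegative bounds as List.range/range'
def acmTeam_alt (topic : List String) : List Int :=
  let tl := topic.map String.toList
  let m := (tl.getD 0 []).length
  let masks := tl.map (fun s => pvMask s m)
  let n := masks.length
  let st := (List.range n).foldl (fun (st : Int × Int) i =>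
      (List.range' (i + 1) (n - (i + 1))).foldl (fun st2 j =>
        let c : Int := (PySem.Int.bitCount (PySem.Int.bor (masks.getD i 0) (masks.getD j 0)) : Int)
        if st2.1 < c then (c, 1) else if c = st2.1 then (st2.1, st2.2 + 1) else st2) st) (-1, 0)
  [st.1, st.2]

-- ===== PRECONDITION & SPEC =====
-- Pre_ excludes inputs with fewer than two rows (topic[0]/steams[0] raise IndexError in A) and ragged
-- inputs with a row shorter than the first: there A usually raises IndexError at topic[i][k], but may
-- return a value when the short row is never indexed because 'topic[i][k]=="0" and ...' short-circuits —
-- an accident of evaluation order no one would specify; B raises IndexError on all such ragged inputs.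
def Pre_acmTeam (topic : List String) : Prop :=
  2 ≤ topic.length ∧ ∀ s ∈ topic, (topic.headI).toList.length ≤ s.toList.length
instance (topic : List String) : Decidable (Pre_acmTeam topic) := by unfold Pre_acmTeam; infer_instance

def pvWitness_acmTeam : List String := ["10101", "11100", "11010", "00101"]

-- On a single-row input A raises IndexError at steams[0] (there are no pairs) while B's pair loop
-- is simply empty and it returns its initial running best/count [-1, 0].
def Raises_acmTeam (topic : List String) : Prop := topic.length = 1
instance (topic : List String) : Decidable (Raises_acmTeam topic) := by unfold Raises_acmTeam; infer_instance

def pvRaiseWitness_acmTeam : List String := ["101"]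
def pvRaiseWitnessOut_acmTeam : List Int := [-1, 0]

def Spec_acmTeam (topic : List String) (out : List Int) : Prop := out = acmTeam_alt topic
instance (topic : List String) (out : List Int) : Decidable (Spec_acmTeam topic out) := by unfold Spec_acmTeam; infer_instance

-- ===== CLAIM (what is proved, stated in full; the proofs are below) =====
def Claim_equal_acmTeam : Prop := ∀ (topic : List String), Dom_acmTeam topic → Pre_acmTeam topic → Spec_acmTeam topic (acmTeam topic)
def Claim_raises_acmTeam : Prop := (∀ (topic : List String), Dom_acmTeam topic → Raises_acmTeam topic → ¬ Pre_acmTeam topic) ∧ (Dom_acmTeam (pvRaiseWitness_acmTeam) ∧ Raises_acmTeam (pvRaiseWitness_acmTeam) ∧ acmTeam_alt (pvRaiseWitness_acmTeam) = pvRaiseWitnessOut_acmTeam)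

-- ===== LEMMAS AND PROOFS =====

-- masks as naturals, low bit first
def natMask (l : List Char) : Nat := l.foldr (fun c acc => 2 * acc + (if c ≠ '0' then 1 else 0)) 0

-- number of positions where not both rows have '0'
def onesN : List Char → List Char → Nat
  | c :: u, d :: v => (if c = '0' ∧ d = '0' then 0 else 1) + onesN u v
  | _, _ => 0

-- the running (best, cnt) update of B's inner loop
def pvStep (st : Int × Int) (c : Int) : Int × Int :=
  if st.1 < c then (c, 1) else if c = st.1 then (st.1, st.2 + 1) else st

theorem natMask_cons (c : Char) (l : List Char) :
    natMask (c :: l) = 2 * natMask l + (if c ≠ '0' then 1 else 0) := rfl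

theorem natMask_append (x : List Char) (a : Char) :
    natMask (x ++ [a]) = natMask x + (if a ≠ '0' then 1 else 0) * 2 ^ x.length := by
  induction x with
  | nil => simp [natMask]
  | cons c x ih =>
      simp only [List.cons_append, natMask_cons, ih, List.length_cons]
      ring

theorem pvMask_eq_natMask (s : List Char) : ∀ (m : Nat), m ≤ s.length →
    pvMask s m = ((natMask (s.take m) : Nat) : Int) := by
  intro m
  induction m with
  | zero => intro _; simp [pvMask, natMask]
  | succ m ih =>
      intro h
      have hm : m < s.length := by omega
      rw [pvMask, List.range_succ, List.foldl_append, List.foldl_cons, List.foldl_nil, ← pvMask]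
      rw [List.take_add_one, List.getElem?_eq_getElem hm]
      simp only [Option.toList_some]
      rw [natMask_append, ih (by omega), List.getD_eq_getElem s ' ' hm]
      have hlen : (s.take m).length = m := by simp; omega
      have hsh : (1 : Int) <<< m = 2 ^ m := by
        rw [Int.shiftLeft_eq]
        norm_num
      rw [hlen]
      split_ifs <;> push_cast <;> simp [hsh]

theorem bit_prop (p : Prop) [Decidable p] (x : Nat) :
    2 * x + (if p then 1 else 0) = Nat.bit (decide p) x := by
  by_cases h : p <;> simp [Nat.bit, h]

theorem bitCount_bit (b : Bool) (n : Nat) :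
    PySem.Int.bitCount ((Nat.bit b n : Nat) : Int) = b.toNat + PySem.Int.bitCount ((n : Nat) : Int) := by
  by_cases h : Nat.bit b n = 0
  · have hb : b = false ∧ n = 0 := by
      cases b
      · exact ⟨rfl, by simpa [Nat.bit] using h⟩
      · simp [Nat.bit] at h
    obtain ⟨rfl, rfl⟩ := hb
    simp [Nat.bit]
  · rw [PySem.Int.bitCount_natCast (h := Nat.pos_of_ne_zero h), Nat.bit_div_two, Nat.bit_mod_two]

theorem bitCount_lor_masks : ∀ (u v : List Char), u.length = v.length →
    PySem.Int.bitCount (((natMask u ||| natMask v : Nat) : Int)) = onesN u v := by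
  intro u
  induction u with
  | nil =>
      intro v h
      have hv : v = [] := List.eq_nil_of_length_eq_zero (by simpa using h.symm)
      subst hv
      simp [natMask, onesN]
  | cons c u ih =>
      intro v h
      cases v with
      | nil => simp at h
      | cons d v =>
          rw [natMask_cons, natMask_cons, bit_prop, bit_prop, Nat.lor_bit, bitCount_bit,
            ih v (by simpa using h)]
          show _ = onesN (c :: u) (d :: v)
          rw [onesN]
          by_cases hc : c = '0' <;> by_cases hd : d = '0' <;> simp [hc, hd]

theorem onesN_append : ∀ (x y : List Char), x.length = y.length → ∀ (a b : Char),
    onesN (x ++ [a]) (y ++ [b]) = onesN x y + (if a = '0' ∧ b = '0' then 0 else 1) := by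
  intro x
  induction x with
  | nil =>
      intro y h a b
      have hy : y = [] := List.eq_nil_of_length_eq_zero (by simpa using h.symm)
      subst hy
      simp [onesN]
  | cons c x ih =>
      intro y h a b
      cases y with
      | nil => simp at h
      | cons d y =>
          simp only [List.cons_append, onesN]
          rw [ih y (by simpa using h) a b]
          omega

theorem acmInnerA_snd (u v : List Char) : ∀ (m : Nat), m ≤ u.length → m ≤ v.length →
    (acmInnerA u v m).2 = ((onesN (u.take m) (v.take m) : Nat) : Int) := by
  intro m
  induction m with
  | zero => intro _ _; simp [acmInnerA, onesN]
  | succ m ih =>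
      intro hu hv
      have hu' : m < u.length := by omega
      have hv' : m < v.length := by omega
      have hstep : (acmInnerA u v (m + 1)).2 =
          if u.getD m ' ' = '0' ∧ v.getD m ' ' = '0' then (acmInnerA u v m).2
          else (acmInnerA u v m).2 + 1 := by
        rw [acmInnerA, List.range_succ, List.foldl_append, List.foldl_cons, List.foldl_nil]
        rw [← acmInnerA]
        split_ifs <;> rfl
      rw [hstep, List.take_add_one, List.take_add_one,
        List.getElem?_eq_getElem hu', List.getElem?_eq_getElem hv']
      simp only [Option.toList_some]
      rw [onesN_append _ _ (by simp; omega) _ _,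
        List.getD_eq_getElem u ' ' hu', List.getD_eq_getElem v ' ' hv', ih (by omega) (by omega)]
      split_ifs <;> push_cast <;> omega

-- the pointwise bridge: B's popcount of OR-ed masks is A's ones counter
theorem pointwise (u v : List Char) (m : Nat) (hu : m ≤ u.length) (hv : m ≤ v.length) :
    ((PySem.Int.bitCount (PySem.Int.bor (pvMask u m) (pvMask v m)) : Nat) : Int)
      = (acmInnerA u v m).2 := by
  rw [pvMask_eq_natMask u m hu, pvMask_eq_natMask v m hv, PySem.Int.bor_natCast,
    bitCount_lor_masks _ _ (by simp; omega), acmInnerA_snd u v m hu hv]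

theorem pvStep_foldl : ∀ (L : List Int) (b c : Int),
    L.foldl pvStep (b, c) =
      (L.foldl max b, (if L.foldl max b = b then c else 0) + (L.count (L.foldl max b) : Int)) := by
  intro L
  induction L with
  | nil => intro b c; simp
  | cons x xs ih =>
      intro b c
      have h1 : pvStep (b, c) x = (max b x, if b < x then 1 else if x = b then c + 1 else c) := by
        rw [pvStep]
        split_ifs <;> refine Prod.ext ?_ ?_ <;> simp <;> omega
      rw [List.foldl_cons, List.foldl_cons, h1, ih]
      have hbx : max b x ≤ xs.foldl max (max b x) := (PySem.List.le_foldl_max xs (max b x)).1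
      have hcnt : ((x :: xs).count (xs.foldl max (max b x)) : Int)
          = (xs.count (xs.foldl max (max b x)) : Int)
            + (if x = xs.foldl max (max b x) then 1 else 0) := by
        rw [List.count_cons]
        simp only [beq_iff_eq]
        push_cast
        ring
      refine Prod.ext rfl ?_
      simp only [hcnt]
      have hb : b ≤ max b x := le_max_left b x
      have hx : x ≤ max b x := le_max_right b x
      rcases max_choice b x with h | h <;> rw [h] at hbx hb hx ⊢ <;> split_ifs <;> omega

theorem acmCou_eq_count : ∀ (S : List Int) (k : Int),
    S.Pairwise (fun a b => b ≤ a) → (∀ x ∈ S, x ≤ k) → acmCou S k = (S.count k : Int) := by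
  intro S
  induction S with
  | nil => intro k _ _; simp [acmCou]
  | cons x xs ih =>
      intro k hp hle
      rw [acmCou]
      by_cases hx : x = k
      · rw [if_pos hx, ih k (List.Pairwise.of_cons hp)
            (fun y hy => hle y (List.mem_cons_of_mem x hy))]
        rw [List.count_cons]
        simp [hx]
        omega
      · rw [if_neg hx]
        have hx' : x < k := lt_of_le_of_ne (hle x (List.mem_cons_self)) hx
        have : (x :: xs).count k = 0 := by
          rw [List.count_eq_zero]
          intro hmem
          rcases List.mem_cons.mp hmem with h | h
          · exact hx (h.symm)
          · have := (List.pairwise_cons.mp hp).1 k h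
            omega
        rw [this]
        simp

-- A's sort-then-scan equals B's running max/count, on a nonempty list of nonnegatives
theorem final_eq (L : List Int) (hne : L ≠ []) (h0 : ∀ x ∈ L, 0 ≤ x) :
    [(PySem.List.sorted L (fun x => x) true).getD 0 0,
      acmCou (PySem.List.sorted L (fun x => x) true)
        ((PySem.List.sorted L (fun x => x) true).getD 0 0)]
    = [(L.foldl pvStep (-1, 0)).1, (L.foldl pvStep (-1, 0)).2] := by
  cases h : PySem.List.sorted L (fun x => x) true with
  | nil => exact absurd ((PySem.List.sorted_eq_nil_iff L _ true).mp h) hne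
  | cons k t =>
      have hmaxL : ∀ y ∈ L, y ≤ k := by
        have := PySem.List.key_head_sorted_rev_ge L (fun x => x) h
        simpa using this
      have hkL : k ∈ L := by
        have : k ∈ PySem.List.sorted L (fun x => x) true := by rw [h]; exact List.mem_cons_self
        exact (PySem.List.mem_sorted L _ true k).mp this
      have hpair : (k :: t).Pairwise (fun a b => b ≤ a) := by
        have := PySem.List.sorted_pairwise_rev L (fun x : Int => x)
        rw [h] at this
        simpa using this
      have hcou : acmCou (k :: t) k = ((k :: t).count k : Int) :=
        acmCou_eq_count _ _ hpair (fun x hx => hmaxL x ((PySem.List.mem_sorted L _ true x).mp (h ▸ hx)))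
      have hcount : (k :: t).count k = L.count k := by
        have hperm : (k :: t).Perm L := h ▸ PySem.List.sorted_perm L (fun x : Int => x) true
        exact hperm.count_eq k
      rw [pvStep_foldl]
      set M := L.foldl max (-1) with hM
      have h1 : ∀ y ∈ L, y ≤ M := (PySem.List.le_foldl_max L (-1)).2
      have hkM : k ≤ M := h1 k hkL
      have h0k : (0 : Int) ≤ k := h0 k hkL
      have hMem : M = -1 ∨ M ∈ L := PySem.List.foldl_max_mem L (-1)
      have hMk : M = k := by
        rcases hMem with hm | hm
        · omega
        · exact le_antisymm (hmaxL M hm) hkM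
      simp only [List.getD_cons_zero, hcou, hcount, hMk]
      have : (if k = -1 then (0 : Int) else 0) = 0 := ite_self 0
      rw [this, zero_add]

-- A's nested append-loops build the flat list of pair results
theorem nestedA (F : Nat → Nat → Int) (n : Nat) :
    (List.range (n - 1)).foldl (fun acc i =>
      (List.range' (i + 1) (n - (i + 1))).foldl (fun acc2 j => acc2 ++ [F i j]) acc) ([] : List Int)
    = (List.range (n - 1)).flatMap (fun i => (List.range' (i + 1) (n - (i + 1))).map (F i)) := by
  have h : (fun (acc : List Int) (i : Nat) =>
      (List.range' (i + 1) (n - (i + 1))).foldl (fun acc2 j => acc2 ++ [F i j]) acc)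
      = fun acc i => acc ++ (List.range' (i + 1) (n - (i + 1))).map (F i) := by
    funext acc i
    exact PySem.List.foldl_append_singleton_eq_map (F i) _ acc
  rw [h, PySem.List.foldl_append_eq_flatMap]
  simp

-- B's nested running-max loops are one pvStep fold over the same flat list
theorem nestedB (F : Nat → Nat → Int) (n : Nat) (init : Int × Int) :
    (List.range n).foldl (fun st i =>
      (List.range' (i + 1) (n - (i + 1))).foldl (fun st2 j =>
        if st2.1 < F i j then (F i j, 1)
        else if F i j = st2.1 then (st2.1, st2.2 + 1) else st2) st) init
    = ((List.range n).flatMap (fun i =>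
        (List.range' (i + 1) (n - (i + 1))).map (F i))).foldl pvStep init := by
  rw [List.foldl_flatMap]
  refine PySem.List.foldl_congr_mem (List.range n) _ _ init ?_
  intro acc i _
  rw [List.foldl_map]
  rfl

-- ===== VERDICT (by name: the statement is the Claim_ definition above) =====
theorem acmTeam_spec : Claim_equal_acmTeam := by
  intro topic _ hpre
  obtain ⟨hlen2, hall⟩ := hpre
  obtain ⟨s0, rest, rfl⟩ : ∃ s0 rest, topic = s0 :: rest := by
    cases topic with
    | nil => simp at hlen2
    | cons a l => exact ⟨a, l, rfl⟩
  simp only [Spec_acmTeam, acmTeam, acmTeam_alt]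
  rw [nestedA, nestedB]
  set tl : List (List Char) := List.map String.toList (s0 :: rest) with htl
  set m : Nat := (tl.getD 0 []).length with hmdef
  set n : Nat := tl.length with hndef
  have hmlen : (List.map (fun s => pvMask s m) tl).length = n := by
    rw [List.length_map]
  rw [hmlen]
  have hn2 : 2 ≤ n := by simpa [hndef, htl] using hlen2
  have hm : ∀ l ∈ tl, m ≤ l.length := by
    intro l hl
    obtain ⟨s, hs, rfl⟩ := List.mem_map.mp hl
    simpa [hmdef, htl] using hall s hs
  have hget : ∀ idx : Nat, idx < n →
      (List.map (fun s => pvMask s m) tl).getD idx 0 = pvMask (tl.getD idx []) m := by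
    intro idx hidx
    rw [List.getD_eq_getElem _ _ (by rw [List.length_map]; exact hidx), List.getElem_map,
      List.getD_eq_getElem _ _ hidx]
  have hmem_getD : ∀ idx : Nat, idx < n → tl.getD idx [] ∈ tl := by
    intro idx hidx
    rw [List.getD_eq_getElem _ _ hidx]
    exact List.getElem_mem hidx
  have hL : (List.range n).flatMap (fun i =>
        (List.range' (i + 1) (n - (i + 1))).map (fun j =>
          ((PySem.Int.bitCount (PySem.Int.bor ((List.map (fun s => pvMask s m) tl).getD i 0)
            ((List.map (fun s => pvMask s m) tl).getD j 0)) : Nat) : Int)))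
      = (List.range (n - 1)).flatMap (fun i =>
        (List.range' (i + 1) (n - (i + 1))).map (fun j =>
          (acmInnerA (tl.getD i []) (tl.getD j []) m).2)) := by
    have hsplit : List.range n = List.range (n - 1) ++ [n - 1] := by
      conv_lhs => rw [show n = (n - 1) + 1 by omega]
      rw [List.range_succ]
    rw [hsplit, List.flatMap_append]
    have hemp : List.range' ((n - 1) + 1) (n - ((n - 1) + 1)) = [] := by
      have h0 : n - ((n - 1) + 1) = 0 := by omega
      rw [h0, List.range'_zero]
    simp only [List.flatMap_cons, List.flatMap_nil, hemp, List.map_nil, List.append_nil]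
    apply List.flatMap_congr
    intro i hi
    apply List.map_congr_left
    intro j hj
    have hi' : i < n - 1 := List.mem_range.mp hi
    have hj' : j < n := by
      have := List.mem_range'_1.mp hj
      omega
    rw [hget i (by omega), hget j hj']
    exact pointwise _ _ m (hm _ (hmem_getD i (by omega))) (hm _ (hmem_getD j hj'))
  rw [hL]
  have hmem : (acmInnerA (tl.getD 0 []) (tl.getD 1 []) m).2 ∈
      (List.range (n - 1)).flatMap (fun i =>
        (List.range' (i + 1) (n - (i + 1))).map (fun j =>
          (acmInnerA (tl.getD i []) (tl.getD j []) m).2)) :=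
    List.mem_flatMap.mpr ⟨0, List.mem_range.mpr (by omega),
      List.mem_map.mpr ⟨1, List.mem_range'_1.mpr (by omega), rfl⟩⟩
  have hne : (List.range (n - 1)).flatMap (fun i =>
      (List.range' (i + 1) (n - (i + 1))).map (fun j =>
        (acmInnerA (tl.getD i []) (tl.getD j []) m).2)) ≠ [] :=
    List.ne_nil_of_mem hmem
  have h0 : ∀ x ∈ (List.range (n - 1)).flatMap (fun i =>
      (List.range' (i + 1) (n - (i + 1))).map (fun j =>
        (acmInnerA (tl.getD i []) (tl.getD j []) m).2)), 0 ≤ x := by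
    rw [← hL]
    intro x hx
    obtain ⟨i, _, hx2⟩ := List.mem_flatMap.mp hx
    obtain ⟨j, _, rfl⟩ := List.mem_map.mp hx2
    exact Int.natCast_nonneg _
  exact final_eq _ hne h0

@[simp]
theorem acmTeam_raises : Claim_raises_acmTeam := by
  unfold Claim_raises_acmTeam
  constructor
  · intro topic _ hr hp
    obtain ⟨hp1, _⟩ := hp
    simp only [Raises_acmTeam] at hr
    omega
  · exact ⟨by decide, by decide, by decide⟩
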